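-- pv_equiv track=rewrite | github.com/NanashinoPro/PaxMachina | src/agent/prompts/base.py | _filter_news_for_country
-- ===== SOURCE A (Python) =====
-- from typing import List
--
-- def _filter_news_for_country(news_list: List[str], country_name: str, all_country_names: List[str]) -> List[str]:
--     """自国に関連するニュース + グローバルニュース（どの国名も含まないもの）のみ抽出する。
--
--     自国が直接関与しない他国間のニュース（例：A国→B国の外交メッセージ）を除外し、
--     プロンプトサイズを削減することで、LLMのDB検索ツール利用を促進する。
--     """
--     filtered = []
--     for news in news_list:
--         # 自国名が含まれている → 関連ニュース（自国が送受信側、または言及対象）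
--         if country_name in news:
--             filtered.append(news)
--         # どの国名も含まない → グローバルニュース（全員に配信）
--         elif not any(name in news for name in all_country_names):
--             filtered.append(news)
--     return filtered
-- ===== SOURCE B (Python) =====
-- from typing import List
--
-- def _filter_news_for_country(news_list: List[str], country_name: str, all_country_names: List[str]) -> List[str]:
--     # Multi-pattern scan: bucket country names under their first character once,
--     # then detect "mentions any country" by one left-to-right walk over each news
--     # string, consulting only the bucket of the current character (startswith at
--     # that position) -- the per-name full substring scans of A disappear.
--     has_empty = "" in all_country_names
--     by_first = {}
--     for name in all_country_names:
--         if name: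
--             by_first.setdefault(name[0], []).append(name)
--     out = []
--     for news in news_list:
--         if country_name in news:
--             out.append(news)
--         else:
--             mentioned = has_empty
--             if not mentioned:
--                 for i in range(len(news)):
--                     if any(news.startswith(name, i) for name in by_first.get(news[i], ())):
--                         mentioned = True
--                         break
--             if not mentioned:
--                 out.append(news)
--     return out
-- ===== Notes on version B (the rewrite author's own statement) =====
-- stated objective: alternative
-- what changed: B replaces A's per-news loop over all country names with repeated substring searches ('name in news') by a multi-pattern matcher: it builds a dict bucketing country names under their first character once, then detects 'mentions any country' with a single left-to-right walk over each news string, testing startswith only for the names bucketed under the current character.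
import Mathlib
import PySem

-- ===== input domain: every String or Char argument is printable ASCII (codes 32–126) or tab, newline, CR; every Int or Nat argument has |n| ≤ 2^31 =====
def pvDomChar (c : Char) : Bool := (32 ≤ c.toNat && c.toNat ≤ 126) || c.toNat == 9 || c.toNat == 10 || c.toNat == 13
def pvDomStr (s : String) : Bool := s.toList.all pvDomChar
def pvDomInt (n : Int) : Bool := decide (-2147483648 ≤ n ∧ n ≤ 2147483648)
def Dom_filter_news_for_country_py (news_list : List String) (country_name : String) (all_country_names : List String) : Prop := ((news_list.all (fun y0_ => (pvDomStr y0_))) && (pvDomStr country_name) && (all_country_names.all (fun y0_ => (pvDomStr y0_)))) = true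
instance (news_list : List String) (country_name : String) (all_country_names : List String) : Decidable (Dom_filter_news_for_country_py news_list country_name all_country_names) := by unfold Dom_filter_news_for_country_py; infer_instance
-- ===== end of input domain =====

-- B replaces A's per-name substring scans (`any(name in news)`) by a first-character
-- bucket index over the country names and one left-to-right walk per news string;
-- objective: alternative multi-pattern algorithm, proved to return the same list.


-- ===== PORT A =====
-- literal transliteration of A: one loop over news_list, if/elif with `any` over names
def filter_news_for_country_py (news_list : List String) (country_name : String) (all_country_names : List String) : List String :=
  news_list.foldl (fun filtered news =>
    if PySem.Str.isIn country_name news then filtered ++ [news]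
    else if !(all_country_names.any (fun name => PySem.Str.isIn name news)) then filtered ++ [news]
    else filtered) []

-- ===== PORT B =====
-- `by_first` build: setdefault(name[0], []).append(name) is Dict.modify with default []
def alt_index (names : List String) : PySem.Dict Char (List String) :=
  names.foldl (fun d name =>
    match name.toList with
    | [] => d
    | c :: _ => d.modify c [] (· ++ [name])) PySem.Dict.empty

-- the inner `for i in range(len(news)): if any(news.startswith(name, i) ...): break`
-- loop: news.startswith(name, i) is "name is a prefix of the i-th suffix", so the scan
-- recurses over the suffixes of the character list (first suffix = position i)
def alt_scan (d : PySem.Dict Char (List String)) : List Char → Bool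
  | [] => false
  | c :: rest =>
      (d.getD c []).any (fun name => PySem.Chars.startswith (c :: rest) name.toList)
      || alt_scan d rest

def filter_news_for_country_py_alt (news_list : List String) (country_name : String) (all_country_names : List String) : List String :=
  let hasEmpty := all_country_names.contains ""
  let byFirst := alt_index all_country_names
  news_list.foldl (fun out news =>
    if PySem.Str.isIn country_name news then out ++ [news]
    else if hasEmpty || alt_scan byFirst news.toList then out
    else out ++ [news]) []

-- ===== PRECONDITION & SPEC =====
def Spec_filter_news_for_country_py (news_list : List String) (country_name : String) (all_country_names : List String) (out : List String) : Prop := out = filter_news_for_country_py_alt news_list country_name all_country_names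
instance (news_list : List String) (country_name : String) (all_country_names : List String) (out : List String) : Decidable (Spec_filter_news_for_country_py news_list country_name all_country_names out) := by unfold Spec_filter_news_for_country_py; infer_instance

-- ===== CLAIM (what is proved, stated in full; the proofs are below) =====
def Claim_equal_filter_news_for_country_py : Prop := ∀ (news_list : List String) (country_name : String) (all_country_names : List String), Dom_filter_news_for_country_py news_list country_name all_country_names → Spec_filter_news_for_country_py news_list country_name all_country_names (filter_news_for_country_py news_list country_name all_country_names)

-- ===== LEMMAS AND PROOFS =====

-- the index maps each character c to the names whose first character is c, in order
theorem alt_index_getD_aux (names : List String) (c : Char) (d : PySem.Dict Char (List String)) :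
    (names.foldl (fun d name => match name.toList with | [] => d | c' :: _ => d.modify c' [] (· ++ [name])) d).getD c []
      = d.getD c [] ++ names.filter (fun nm => nm.toList.head? == some c) := by
  induction names generalizing d with
  | nil => simp
  | cons nm rest ih =>
    rw [List.foldl_cons, List.filter_cons]
    cases h : nm.toList with
    | nil => rw [ih]; simp
    | cons c' t =>
      simp only []
      rw [ih, PySem.Dict.getD_modify]
      by_cases hc : c = c'
      · subst hc; simp
      · simp [hc, Ne.symm hc]

theorem alt_index_getD (names : List String) (c : Char) :
    (alt_index names).getD c [] = names.filter (fun nm => nm.toList.head? == some c) := by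
  unfold alt_index
  rw [alt_index_getD_aux]
  simp [PySem.Dict.getD_empty]

-- the suffix scan finds exactly the nonempty names occurring somewhere in the text
theorem alt_scan_iff (names : List String) (l : List Char)
    (d : PySem.Dict Char (List String))
    (hd : ∀ c, d.getD c [] = names.filter (fun nm => nm.toList.head? == some c)) :
    alt_scan d l = true ↔ ∃ nm ∈ names, nm.toList ≠ [] ∧ ∃ j, nm.toList <+: l.drop j := by
  induction l with
  | nil =>
    simp only [alt_scan, Bool.false_eq_true, false_iff]
    rintro ⟨nm, _, hne, j, hpre⟩
    rw [List.drop_nil] at hpre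
    exact hne (List.prefix_nil.mp hpre)
  | cons c rest ih =>
    simp only [alt_scan, Bool.or_eq_true, List.any_eq_true, ih]
    constructor
    · rintro (⟨nm, hmem, hsw⟩ | ⟨nm, hmem, hne, j, hpre⟩)
      · rw [hd] at hmem
        obtain ⟨hn, hc⟩ := List.mem_filter.mp hmem
        refine ⟨nm, hn, ?_, 0, ?_⟩
        · intro h; rw [h] at hc; simp at hc
        · simpa using (PySem.Chars.startswith_iff _ _).mp hsw
      · exact ⟨nm, hmem, hne, j + 1, by simpa using hpre⟩
    · rintro ⟨nm, hmem, hne, j, hpre⟩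
      cases j with
      | zero =>
        left
        rw [List.drop_zero] at hpre
        refine ⟨nm, ?_, (PySem.Chars.startswith_iff _ _).mpr hpre⟩
        rw [hd]
        refine List.mem_filter.mpr ⟨hmem, ?_⟩
        cases hx : nm.toList with
        | nil => exact absurd hx hne
        | cons a s =>
          rw [hx] at hpre
          obtain ⟨t, ht⟩ := hpre
          rw [List.cons_append] at ht
          injection ht with h1 _
          simp [h1]
      | succ j =>
        right
        exact ⟨nm, hmem, hne, j, by simpa using hpre⟩

-- B's "mentioned" test equals A's `any(name in news for name in names)`
theorem mentioned_eq (names : List String) (news : String) :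
    (names.contains "" || alt_scan (alt_index names) news.toList)
      = names.any (fun name => PySem.Str.isIn name news) := by
  rw [Bool.eq_iff_iff, Bool.or_eq_true,
    alt_scan_iff names news.toList _ (fun c => alt_index_getD names c)]
  simp only [List.any_eq_true, List.contains_iff_mem]
  constructor
  · rintro (h | ⟨nm, hmem, _, j, hpre⟩)
    · refine ⟨"", h, ?_⟩
      simp [PySem.Str.isIn_eq, PySem.Chars.isIn_nil]
    · refine ⟨nm, hmem, ?_⟩
      have := (PySem.Chars.exists_prefix_drop_iff_isIn (sub := nm.toList) (s := news.toList)).mp ⟨j, hpre⟩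
      simpa [PySem.Str.isIn_eq] using this
  · rintro ⟨nm, hmem, hin⟩
    by_cases hne : nm.toList = []
    · left
      rwa [String.toList_eq_nil_iff.mp hne] at hmem
    · right
      have hin' : PySem.Chars.isIn nm.toList news.toList = true := by
        simpa [PySem.Str.isIn_eq] using hin
      obtain ⟨j, hpre⟩ := (PySem.Chars.exists_prefix_drop_iff_isIn _ _).mpr hin'
      exact ⟨nm, hmem, hne, j, hpre⟩

-- ===== VERDICT (by name: the statement is the Claim_ definition above) =====
theorem filter_news_for_country_py_spec : Claim_equal_filter_news_for_country_py := by
  intro news_list country_name all_country_names _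
  unfold Spec_filter_news_for_country_py filter_news_for_country_py filter_news_for_country_py_alt
  apply PySem.List.foldl_congr_mem
  intro acc news _
  rw [mentioned_eq]
  cases h1 : PySem.Str.isIn country_name news <;>
    cases h2 : all_country_names.any (fun name => PySem.Str.isIn name news) <;> simp
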